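-- pv_equiv track=rewrite | github.com/addiskers/GII-master | report_generator/multi_scraper/multi_scraper/spiders/data.py | title_h1
-- ===== SOURCE A (Python) =====
-- def title_h1(segments_data, market_name):
--     # Build segment parts with ALL sub-segments
--     segment_parts = []  # list of (segment_name, [sub_segments])
--     for segment, sub_segments in segments_data.items():
--         top_level_subsegments = [s for s in sub_segments if isinstance(s, str)]
--         segment_parts.append((segment, list(top_level_subsegments)))
--
--     def build_title(parts):
--         pieces = []
--         for seg_name, subs in parts:
--             if subs:
--                 pieces.append(f"By {seg_name} ({', '.join(subs)})")
--             else: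
--                 pieces.append(f"By {seg_name}")
--         pieces.append("By Region")
--         text_seg = ", ".join(pieces)
--         return f"{market_name} Size, Share, Growth Analysis, {text_seg} - Industry Forecast 2026-2033"
--
--     title = build_title(segment_parts)
--
--     # If >40 words, remove sub-segments from the LAST segment first, then work backwards
--     while len(title.split()) > 40 and segment_parts:
--         trimmed = False
--         for i in range(len(segment_parts) - 1, -1, -1):
--             if segment_parts[i][1]:  # has sub-segments
--                 segment_parts[i] = (segment_parts[i][0], [])  # remove them
--                 trimmed = True
--                 break
--         if not trimmed:
--             break  # nothing left to trim
--         title = build_title(segment_parts)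
--
--     return title
-- ===== SOURCE B (Python) =====
-- def title_h1(segments_data, market_name):
--     parts = [(seg, [s for s in subs if isinstance(s, str)])
--              for seg, subs in segments_data.items()]
--
--     def piece(seg, subs):
--         return f"By {seg} ({', '.join(subs)})" if subs else f"By {seg}"
--
--     # word count of each piece in both states, counted together with the ", "
--     # separator that follows it in the assembled title
--     full_c = [len((piece(seg, subs) + ",").split()) for seg, subs in parts]
--     bare_c = [len((piece(seg, []) + ",").split()) for seg, subs in parts]
--
--     # fixed words: market_name + "Size, Share, Growth Analysis," (4)
--     #              + "By Region" (2) + "- Industry Forecast 2026-2033" (4)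
--     total = len(market_name.split()) + 10 + sum(full_c)
--
--     keep = [True] * len(parts)
--     for i in range(len(parts) - 1, -1, -1):
--         if total > 40 and parts[i][1]:
--             keep[i] = False
--             total -= full_c[i] - bare_c[i]
--
--     pieces = [piece(seg, subs if k else []) for (seg, subs), k in zip(parts, keep)]
--     pieces.append("By Region")
--     text_seg = ", ".join(pieces)
--     return f"{market_name} Size, Share, Growth Analysis, {text_seg} - Industry Forecast 2026-2033"
-- ===== Notes on version B (the rewrite author's own statement) =====
-- stated objective: faster
-- what changed: A's trim loop rebuilds the full title string and re-splits it into words after every single strip; B precomputes each piece's split() word count once (with and without sub-segments), runs one backward pass subtracting deltas from a running word budget, and builds the title string exactly once.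
import Mathlib
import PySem

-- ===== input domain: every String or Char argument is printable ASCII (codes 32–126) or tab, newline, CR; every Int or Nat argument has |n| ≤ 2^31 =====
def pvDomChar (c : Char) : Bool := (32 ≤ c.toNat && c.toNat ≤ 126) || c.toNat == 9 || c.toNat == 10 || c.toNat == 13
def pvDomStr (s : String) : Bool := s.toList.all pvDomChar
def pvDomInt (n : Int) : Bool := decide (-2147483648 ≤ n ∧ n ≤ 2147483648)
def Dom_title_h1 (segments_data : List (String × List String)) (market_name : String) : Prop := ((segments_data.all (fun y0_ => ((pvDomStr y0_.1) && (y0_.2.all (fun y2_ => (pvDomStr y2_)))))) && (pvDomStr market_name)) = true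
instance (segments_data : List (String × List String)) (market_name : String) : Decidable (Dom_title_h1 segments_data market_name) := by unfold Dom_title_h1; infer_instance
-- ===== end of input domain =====

-- B replaces A's trim loop (which rebuilds and re-splits the whole title each iteration) by a
-- single backward word-budget pass over per-piece split() counts computed once, then builds the
-- title string once.

-- shared piece format: the f-string "By {seg} ({', '.join(subs)})" / "By {seg}"
-- (the identical literal appears in both Pythons); at type List String the
-- isinstance(s, str) filter keeps every element
def pieceChars (p : String × List String) : List Char :=
  if p.2.isEmpty then "By ".toList ++ p.1.toList
  else "By ".toList ++ p.1.toList ++ " (".toList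
        ++ PySem.Chars.join ", ".toList (p.2.map String.toList) ++ ")".toList

-- ===== PORT A =====
-- build_title(parts): the pieces loop, "By Region", ", ".join(pieces), the f-string wrapper
def buildTitleChars (mn : List Char) (parts : List (String × List String)) : List Char :=
  let pieces := parts.foldl (fun acc p => acc ++ [pieceChars p]) []
  let pieces := pieces ++ ["By Region".toList]
  let text_seg := PySem.Chars.join ", ".toList pieces
  mn ++ " Size, Share, Growth Analysis, ".toList ++ text_seg ++ " - Industry Forecast 2026-2033".toList

-- the inner 'for i in range(len(segment_parts)-1, -1, -1)' reverse scan: replace the LAST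
-- (segment, subs) that still has sub-segments by (segment, []); none ↔ 'trimmed' stays False
def stripLast : List (String × List String) → Option (List (String × List String))
  | [] => none
  | p :: rest =>
    match stripLast rest with
    | some r => some (p :: r)
    | none => if p.2.isEmpty then none else some ((p.1, ([] : List String)) :: rest)

-- termination measure for A's while loop (cited by loopA's decreasing_by)
theorem stripLast_countP_lt : ∀ {l r : List (String × List String)}, stripLast l = some r →
    r.countP (fun p => !p.2.isEmpty) < l.countP (fun p => !p.2.isEmpty) := by
  intro l
  induction l with
  | nil => intro r h; simp [stripLast] at h
  | cons p rest ih =>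
    intro r h
    simp only [stripLast] at h
    cases hr : stripLast rest with
    | some r' =>
      rw [hr] at h
      cases h
      have := ih hr
      simp only [List.countP_cons]
      omega
    | none =>
      rw [hr] at h
      by_cases hp : p.2.isEmpty
      · simp [hp] at h
      · simp only [hp, if_neg] at h
        cases h
        simp only [List.countP_cons, hp]
        simp

-- the 'while len(title.split()) > 40 and segment_parts:' loop
def loopA (mn : List Char) (parts : List (String × List String)) : List Char :=
  let title := buildTitleChars mn parts
  if 40 < (PySem.Chars.split₀ title).length ∧ parts ≠ [] then
    match h : stripLast parts with
    | some r => loopA mn r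
    | none => title
  else title
termination_by parts.countP (fun p => !p.2.isEmpty)
decreasing_by exact stripLast_countP_lt h

def title_h1 (segments_data : List (String × List String)) (market_name : String) : String :=
  String.ofList (loopA market_name.toList segments_data)

-- ===== PORT B =====
-- len((piece + ",").split()) : word count of a piece together with the ", " that follows it
def wcPiece (p : String × List String) : Nat :=
  (PySem.Chars.split₀ (pieceChars p ++ [','])).length

-- the backward 'for i in range(len(parts)-1, -1, -1)' budget pass: returns the final
-- (segment, subs) list and the final running total
def trimGo : List (String × List String) → Int → List (String × List String) × Int
  | [], t => ([], t)
  | p :: rest, t =>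
    let pr := trimGo rest t
    if 40 < pr.2 ∧ ¬ p.2.isEmpty then
      ((p.1, ([] : List String)) :: pr.1, pr.2 - ((wcPiece p : Int) - (wcPiece (p.1, ([] : List String)) : Int)))
    else (p :: pr.1, pr.2)

def title_h1_alt (segments_data : List (String × List String)) (market_name : String) : String :=
  -- total = len(market_name.split()) + 10 + sum(full_c)
  let total : Int := ((PySem.Chars.split₀ market_name.toList).length : Int) + 10
      + (segments_data.map (fun p => ((wcPiece p : Nat) : Int))).sum
  let final := (trimGo segments_data total).1
  let pieces := final.map pieceChars ++ ["By Region".toList]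
  String.ofList (market_name.toList ++ " Size, Share, Growth Analysis, ".toList
      ++ PySem.Chars.join ", ".toList pieces ++ " - Industry Forecast 2026-2033".toList)

-- ===== PRECONDITION & SPEC =====
def Spec_title_h1 (segments_data : List (String × List String)) (market_name : String) (out : String) : Prop := out = title_h1_alt segments_data market_name
instance (segments_data : List (String × List String)) (market_name : String) (out : String) : Decidable (Spec_title_h1 segments_data market_name out) := by unfold Spec_title_h1; infer_instance

-- ===== CLAIM (what is proved, stated in full; the proofs are below) =====
def Claim_equal_title_h1 : Prop := ∀ (segments_data : List (String × List String)) (market_name : String), Dom_title_h1 segments_data market_name → Spec_title_h1 segments_data market_name (title_h1 segments_data market_name)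

-- ===== LEMMAS AND PROOFS =====

-- split₀.go with a pending accumulator
theorem go_acc : ∀ (s cur : List Char) (acc : List (List Char)),
    PySem.Chars.split₀.go s cur acc = acc.reverse ++ PySem.Chars.split₀.go s cur [] := by
  intro s
  induction s with
  | nil =>
    intro cur acc
    rw [PySem.Chars.split₀.go, PySem.Chars.split₀.go]
    by_cases h : cur.isEmpty <;> simp [h]
  | cons c s ih =>
    intro cur acc
    rw [PySem.Chars.split₀.go]
    conv_rhs => rw [PySem.Chars.split₀.go]
    by_cases hc : PySem.Chars.isspace c
    · by_cases hcur : cur.isEmpty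
      · simp only [hc, hcur, if_true]
        exact ih [] acc
      · simp only [hc, hcur, if_true]
        rw [ih [] (cur.reverse :: acc), ih [] [cur.reverse]]
        simp
    · simp only [hc]
      exact ih (c :: cur) acc

theorem go_space : ∀ (a : List Char) (b cur : List Char),
    PySem.Chars.split₀.go (a ++ ' ' :: b) cur [] =
      PySem.Chars.split₀.go a cur [] ++ PySem.Chars.split₀.go b [] [] := by
  intro a
  induction a with
  | nil =>
    intro b cur
    simp only [List.nil_append]
    rw [PySem.Chars.split₀.go]
    rw [PySem.Chars.split₀.go]
    have hsp : PySem.Chars.isspace ' ' = true := by decide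
    by_cases hcur : cur.isEmpty
    · simp [hsp, hcur]
    · simp only [hsp, hcur, if_true, if_false]
      rw [go_acc b [] [cur.reverse]]
      simp
  | cons c a ih =>
    intro b cur
    simp only [List.cons_append]
    rw [PySem.Chars.split₀.go]
    conv_rhs => rw [PySem.Chars.split₀.go]
    by_cases hc : PySem.Chars.isspace c
    · by_cases hcur : cur.isEmpty
      · simp only [hc, hcur, if_true]
        exact ih b []
      · simp only [hc, hcur, if_true]
        rw [go_acc (a ++ ' ' :: b) [] [cur.reverse], go_acc a [] [cur.reverse], ih b []]
        simp
    · simp only [hc]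
      exact ih b (c :: cur)

-- split() distributes over a single-space junction
theorem split₀_space (a b : List Char) :
    PySem.Chars.split₀ (a ++ ' ' :: b) = PySem.Chars.split₀ a ++ PySem.Chars.split₀ b := by
  simpa [PySem.Chars.split₀] using go_space a b []

theorem intercalate_cons_of_ne_nil (sep x : List Char) {l : List (List Char)} (h : l ≠ []) :
    List.intercalate sep (x :: l) = x ++ sep ++ List.intercalate sep l := by
  cases l with
  | nil => exact absurd rfl h
  | cons y l => simp [List.intercalate, List.intersperse]

-- word count of ", ".join(pieces ++ ["By Region"])
theorem split_join_len : ∀ (l : List (List Char)),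
    (PySem.Chars.split₀ (PySem.Chars.join ", ".toList (l ++ ["By Region".toList]))).length
      = (l.map (fun p => (PySem.Chars.split₀ (p ++ [','])).length)).sum + 2 := by
  intro l
  induction l with
  | nil => decide
  | cons x l ih =>
    have h1 : PySem.Chars.join ", ".toList ((x :: l) ++ ["By Region".toList])
        = (x ++ [',']) ++ ' ' :: PySem.Chars.join ", ".toList (l ++ ["By Region".toList]) := by
      show List.intercalate _ _ = _
      rw [List.cons_append, intercalate_cons_of_ne_nil _ _ (by simp)]
      show x ++ (',' :: ' ' :: []) ++ _ = _
      simp [PySem.Chars.join]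
    rw [h1, split₀_space]
    simp only [List.length_append, List.map_cons, List.sum_cons, ih]
    omega

-- the additive characterisation of A's word count: fixed 10 boilerplate words + market_name
-- words + one per-piece count (each piece counted with its following ", ")
theorem wcTitle_eq (mn : List Char) (parts : List (String × List String)) :
    (PySem.Chars.split₀ (buildTitleChars mn parts)).length
      = (PySem.Chars.split₀ mn).length + 10 + (parts.map wcPiece).sum := by
  have hb : buildTitleChars mn parts
      = mn ++ ' ' :: ("Size, Share, Growth Analysis,".toList
          ++ ' ' :: (PySem.Chars.join ", ".toList (parts.map pieceChars ++ ["By Region".toList])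
          ++ ' ' :: "- Industry Forecast 2026-2033".toList)) := by
    show mn ++ " Size, Share, Growth Analysis, ".toList ++ _ ++ " - Industry Forecast 2026-2033".toList = _
    rw [PySem.List.foldl_append_singleton_eq_map]
    simp
  rw [hb, split₀_space, split₀_space, split₀_space]
  have h4 : (PySem.Chars.split₀ "Size, Share, Growth Analysis,".toList).length = 4 := by decide
  have h5 : (PySem.Chars.split₀ "- Industry Forecast 2026-2033".toList).length = 4 := by decide
  simp only [List.length_append, h4, h5, split_join_len, List.map_map]
  have hmap : (parts.map (fun p => (PySem.Chars.split₀ (pieceChars p ++ [','])).length)).sum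
      = (parts.map wcPiece).sum := rfl
  simp only [Function.comp_def, wcPiece] at *
  omega

theorem stripLast_none_of_bare : ∀ {l : List (String × List String)},
    (∀ p ∈ l, p.2 = []) → stripLast l = none := by
  intro l
  induction l with
  | nil => intro; rfl
  | cons p rest ih =>
    intro h
    have h1 : stripLast rest = none := ih (fun q hq => h q (List.mem_cons_of_mem _ hq))
    have h2 : p.2 = [] := h p List.mem_cons_self
    simp [stripLast, h1, h2]

theorem stripLast_append_some : ∀ (xs : List (String × List String))
    {ys r : List (String × List String)}, stripLast ys = some r →
    stripLast (xs ++ ys) = some (xs ++ r) := by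
  intro xs
  induction xs with
  | nil => intro ys r h; simpa using h
  | cons x xs ih =>
    intro ys r h
    simp only [List.cons_append, stripLast, ih h]

-- one unfolding of A's while loop when a strip happens
theorem loopA_step (mn : List Char) {parts r : List (String × List String)}
    (h40 : 40 < (PySem.Chars.split₀ (buildTitleChars mn parts)).length)
    (hne : parts ≠ []) (hs : stripLast parts = some r) :
    loopA mn parts = loopA mn r := by
  rw [loopA]
  simp only [if_pos (And.intro h40 hne)]
  split
  · next r' hr' => rw [hs] at hr'; cases hr'; rfl
  · next hr' => rw [hs] at hr'; cases hr'

-- A's while loop returns the current title when the count is small or nothing can be trimmed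
theorem loopA_done (mn : List Char) {parts : List (String × List String)}
    (h : ¬ (40 < (PySem.Chars.split₀ (buildTitleChars mn parts)).length) ∨ stripLast parts = none) :
    loopA mn parts = buildTitleChars mn parts := by
  rw [loopA]
  rcases h with h | h
  · rw [if_neg]; intro hc; exact h hc.1
  · by_cases hc : 40 < (PySem.Chars.split₀ (buildTitleChars mn parts)).length ∧ parts ≠ []
    · simp only [if_pos hc]
      split
      · next r' hr' => rw [h] at hr'; cases hr'
      · rfl
    · rw [if_neg hc]

-- A's word count, named for the invariant
def wcT (mn : List Char) (l : List (String × List String)) : Nat :=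
  (PySem.Chars.split₀ (buildTitleChars mn l)).length

theorem wcT_strip (mn : List Char) (pre : List (String × List String))
    (p : String × List String) (r : List (String × List String)) :
    ((wcT mn (pre ++ p :: r) : Int)) - ((wcPiece p : Int) - (wcPiece (p.1, ([] : List String)) : Int))
      = (wcT mn (pre ++ (p.1, ([] : List String)) :: r) : Int) := by
  simp only [wcT, wcTitle_eq, List.map_append, List.sum_append, List.map_cons, List.sum_cons]
  push_cast
  ring

theorem sum_map_cast (l : List (String × List String)) :
    (l.map (fun p => ((wcPiece p : Nat) : Int))).sum = (((l.map wcPiece).sum : Nat) : Int) := by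
  induction l with
  | nil => rfl
  | cons p l ih => simp [ih]

-- the invariant of B's backward pass: started at A's word count of the current parts list, it
-- tracks A's word count exactly, performs exactly A's strips, and when it ends above the budget
-- no sub-segments are left anywhere
theorem trimGo_spec (mn : List Char) : ∀ (s pre : List (String × List String)),
    (trimGo s ((wcT mn (pre ++ s) : Nat) : Int)).2
        = ((wcT mn (pre ++ (trimGo s ((wcT mn (pre ++ s) : Nat) : Int)).1) : Nat) : Int)
    ∧ loopA mn (pre ++ s) = loopA mn (pre ++ (trimGo s ((wcT mn (pre ++ s) : Nat) : Int)).1)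
    ∧ (40 < (trimGo s ((wcT mn (pre ++ s) : Nat) : Int)).2 →
        ∀ p ∈ (trimGo s ((wcT mn (pre ++ s) : Nat) : Int)).1, p.2 = []) := by
  intro s
  induction s with
  | nil =>
    intro pre
    refine ⟨by simp [trimGo], by simp [trimGo], ?_⟩
    intro _ p hp
    simp [trimGo] at hp
  | cons p rest ih =>
    intro pre
    have hsplit : pre ++ p :: rest = (pre ++ [p]) ++ rest := by simp
    set t : Int := ((wcT mn (pre ++ p :: rest) : Nat) : Int) with ht
    have ht' : ((wcT mn ((pre ++ [p]) ++ rest) : Nat) : Int) = t := by rw [← hsplit]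
    obtain ⟨ih1, ih2, ih3⟩ := ih (pre ++ [p])
    rw [ht'] at ih1 ih2 ih3
    set pr := trimGo rest t with hpr
    have hres : trimGo (p :: rest) t =
        if 40 < pr.2 ∧ ¬ p.2.isEmpty then
          ((p.1, ([] : List String)) :: pr.1,
            pr.2 - ((wcPiece p : Int) - (wcPiece (p.1, ([] : List String)) : Int)))
        else (p :: pr.1, pr.2) := by
      rw [trimGo]
    have hcat : ∀ (z : List (String × List String)), (pre ++ [p]) ++ z = pre ++ p :: z := by
      intro z; simp
    rw [hcat pr.1] at ih1 ih2
    by_cases hcond : 40 < pr.2 ∧ ¬ p.2.isEmpty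
    · have hbare : ∀ q ∈ pr.1, q.2 = [] := ih3 hcond.1
      have hstrip : stripLast (pre ++ p :: pr.1) = some (pre ++ (p.1, ([] : List String)) :: pr.1) := by
        apply stripLast_append_some
        have hnone : stripLast pr.1 = none := stripLast_none_of_bare hbare
        simp only [stripLast, hnone]
        rw [if_neg]
        simpa using hcond.2
      have h40 : 40 < (PySem.Chars.split₀ (buildTitleChars mn (pre ++ p :: pr.1))).length := by
        have : (40 : Int) < ((wcT mn (pre ++ p :: pr.1) : Nat) : Int) := ih1 ▸ hcond.1
        exact_mod_cast this
      refine ⟨?_, ?_, ?_⟩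
      · rw [hres, if_pos hcond]
        show pr.2 - _ = _
        rw [ih1, wcT_strip]
      · rw [hres, if_pos hcond]
        show loopA mn (pre ++ p :: rest) = loopA mn (pre ++ (p.1, ([] : List String)) :: pr.1)
        rw [hsplit, ih2]
        exact loopA_step mn h40 (by simp) hstrip
      · rw [hres, if_pos hcond]
        intro _ q hq
        rcases List.mem_cons.mp hq with h | h
        · rw [h]
        · exact hbare q h
    · refine ⟨?_, ?_, ?_⟩
      · rw [hres, if_neg hcond]
        show pr.2 = _
        rw [ih1]
      · rw [hres, if_neg hcond]
        show loopA mn (pre ++ p :: rest) = loopA mn (pre ++ p :: pr.1)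
        rw [hsplit, ih2]
      · rw [hres, if_neg hcond]
        intro hgt q hq
        have hgt' : 40 < pr.2 := by simpa using hgt
        have hpempty : p.2.isEmpty := by
          by_contra hne
          exact hcond ⟨hgt', hne⟩
        rcases List.mem_cons.mp hq with h | h
        · rw [h]; exact List.isEmpty_iff.mp hpempty
        · exact ih3 hgt' q h

-- ===== VERDICT (by name: the statement is the Claim_ definition above) =====
theorem title_h1_spec : Claim_equal_title_h1 := by
  intro sd mn _
  unfold Spec_title_h1 title_h1
  have htot : ((PySem.Chars.split₀ mn.toList).length : Int) + 10
      + (sd.map (fun p => ((wcPiece p : Nat) : Int))).sum = ((wcT mn.toList sd : Nat) : Int) := by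
    rw [sum_map_cast, wcT, wcTitle_eq]
    push_cast
    ring
  obtain ⟨h1, h2, h3⟩ := trimGo_spec mn.toList sd []
  simp only [List.nil_append] at h1 h2 h3
  have hloop : loopA mn.toList sd
      = buildTitleChars mn.toList (trimGo sd ((wcT mn.toList sd : Nat) : Int)).1 := by
    rw [h2]
    set r := trimGo sd ((wcT mn.toList sd : Nat) : Int) with hrdef
    by_cases hgt : 40 < (PySem.Chars.split₀ (buildTitleChars mn.toList r.1)).length
    · have hgtI : 40 < r.2 := by
        rw [h1]
        exact_mod_cast hgt
      exact loopA_done mn.toList (Or.inr (stripLast_none_of_bare (h3 hgtI)))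
    · exact loopA_done mn.toList (Or.inl hgt)
  simp only [title_h1_alt]
  rw [htot, hloop]
  congr 1
  rw [buildTitleChars, PySem.List.foldl_append_singleton_eq_map]
  simp
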